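-- pv_equiv track=rewrite | github.com/Bhare8972/LOFAR-LIM | LoLIM/signal_processing.py | locate_data_loss
-- ===== SOURCE A (Python) =====
-- def locate_data_loss(data, num_zeros):
--     spans = []
--     total = 0
--
-- #    mode = 0 ## 0 means off
--     last_start = None
--     dz_i = 0 ## num double zeros counted
--     for i, d in enumerate(data):
--         if d == 0: ##
--             dz_i += 1
--             if last_start is None:
--                 last_start = i
--
--         elif last_start is not None:
--             if dz_i >= num_zeros:
--                 spans.append( [last_start, i] )
--                 total += i-last_start
--             dz_i = 0
--             last_start = None
--
--
--     if dz_i >= num_zeros: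
--         spans.append( [last_start, i] )
--         total += i-last_start
--
--     return spans, total
-- ===== SOURCE B (Python) =====
-- def locate_data_loss(data, num_zeros):
--     # Pass 1: collect maximal zero runs as (start, end_exclusive).
--     n = len(data)
--     runs = []
--     i = 0
--     while i < n:
--         if data[i] == 0:
--             j = i + 1
--             while j < n and data[j] == 0:
--                 j += 1
--             runs.append((i, j))
--             i = j
--         else:
--             i += 1
--     # Pass 2: emit spans for long-enough runs; a trailing run is clamped to the
--     # last index, matching the final-index convention of the span format.
--     spans = []
--     total = 0
--     for (s, e) in runs:
--         if e - s >= num_zeros: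
--             end = e if e < n else n - 1
--             spans.append([s, end])
--             total += end - s
--     return spans, total
-- ===== Notes on version B (the rewrite author's own statement) =====
-- stated objective: alternative
-- what changed: B replaces A's single stateful scan (last_start/dz_i flags plus a duplicated post-loop append) by two passes: first collect maximal zero runs as (start,end) pairs, then filter runs by length and emit spans, clamping a trailing run to the last index.
import Mathlib
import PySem

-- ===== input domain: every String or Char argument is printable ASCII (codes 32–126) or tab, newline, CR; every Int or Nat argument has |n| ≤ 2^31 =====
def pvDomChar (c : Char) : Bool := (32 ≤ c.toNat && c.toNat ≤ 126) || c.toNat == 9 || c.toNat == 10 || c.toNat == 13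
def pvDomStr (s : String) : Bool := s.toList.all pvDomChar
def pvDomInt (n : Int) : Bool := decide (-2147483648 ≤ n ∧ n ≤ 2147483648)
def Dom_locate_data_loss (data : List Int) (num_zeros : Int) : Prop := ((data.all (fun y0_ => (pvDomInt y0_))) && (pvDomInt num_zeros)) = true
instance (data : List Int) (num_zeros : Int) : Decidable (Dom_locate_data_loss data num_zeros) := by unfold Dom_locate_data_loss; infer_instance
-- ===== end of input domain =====

-- B re-decomposes A's stateful scan into two passes (collect maximal zero runs, then filter/emit); return values agree on Pre_ (where A returns at all).

-- ===== PORT A =====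
-- state = (spans, total, last_start, dz_i), exactly A's loop variables
def pvStepA (num_zeros : Int) (st : List (List Int) × Int × Option Int × Int)
    (i : Int) (d : Int) : List (List Int) × Int × Option Int × Int :=
  match st with
  | (spans, total, last_start, dz) =>
    if d = 0 then
      (spans, total, (match last_start with | none => some i | some s => some s), dz + 1)
    else
      match last_start with
      | some s =>
        if dz ≥ num_zeros then (spans ++ [[s, i]], total + (i - s), none, 0)
        else (spans, total, none, 0)
      | none => (spans, total, none, dz)

-- for i, d in enumerate(data)
def pvLoopA (num_zeros : Int) : List Int → Int → (List (List Int) × Int × Option Int × Int) → (List (List Int) × Int × Option Int × Int)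
  | [], _, st => st
  | d :: rest, i, st => pvLoopA num_zeros rest (i + 1) (pvStepA num_zeros st i d)

-- In Python the final block uses the loop's leftover `i` (= len-1) and may read last_start = None;
-- there it raises (UnboundLocalError/TypeError) — those inputs are excluded by Pre_; the
-- `getD 0` / `length - 1` defaults are only reached outside Pre_.
def locate_data_loss (data : List Int) (num_zeros : Int) : List (List Int) × Int :=
  match pvLoopA num_zeros data 0 ([], 0, none, 0) with
  | (spans, total, last_start, dz) =>
    if dz ≥ num_zeros then
      (spans ++ [[last_start.getD 0, (data.length : Int) - 1]],
       total + ((data.length : Int) - 1 - last_start.getD 0))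
    else (spans, total)

-- ===== PORT B =====
-- inner while: length of the leading zero run
def pvZeroLen : List Int → Nat
  | [] => 0
  | d :: rest => if d = 0 then pvZeroLen rest + 1 else 0

-- outer while: maximal zero runs as (start, end_exclusive); fuel (= remaining
-- length at the top call) bounds the while loop, each iteration consumes >= 1 element
def pvRuns : Nat → List Int → Int → List (Int × Int)
  | 0, _, _ => []
  | _ + 1, [], _ => []
  | fuel + 1, d :: rest, i =>
    if d = 0 then
      let k := pvZeroLen rest
      (i, i + 1 + (k : Int)) :: pvRuns fuel (rest.drop k) (i + 1 + (k : Int))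
    else pvRuns fuel rest (i + 1)

-- second pass: filter runs by length, clamp a trailing run to the last index
def pvSpanStep (num_zeros n : Int) (acc : List (List Int) × Int) (r : Int × Int) : List (List Int) × Int :=
  if r.2 - r.1 ≥ num_zeros then
    let e := if r.2 < n then r.2 else n - 1
    (acc.1 ++ [[r.1, e]], acc.2 + (e - r.1))
  else acc

def locate_data_loss_alt (data : List Int) (num_zeros : Int) : List (List Int) × Int :=
  (pvRuns data.length data 0).foldl (pvSpanStep num_zeros (data.length : Int)) ([], 0)

-- ===== PRECONDITION & SPEC =====
-- Pre_ excludes exactly the inputs where A raises: with num_zeros <= 0 and data empty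
-- (UnboundLocalError: loop index undefined) or data ending in a nonzero (TypeError: i - None).
def Pre_locate_data_loss (data : List Int) (num_zeros : Int) : Prop :=
  0 < num_zeros ∨ data.getLast? = some 0
instance (data : List Int) (num_zeros : Int) : Decidable (Pre_locate_data_loss data num_zeros) := by unfold Pre_locate_data_loss; infer_instance
def pvWitness_locate_data_loss : List Int × Int := ([1, 0, 0, 3, 0], 2)

def Spec_locate_data_loss (data : List Int) (num_zeros : Int) (out : List (List Int) × Int) : Prop := out = locate_data_loss_alt data num_zeros
instance (data : List Int) (num_zeros : Int) (out : List (List Int) × Int) : Decidable (Spec_locate_data_loss data num_zeros out) := by unfold Spec_locate_data_loss; infer_instance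

-- ===== CLAIM (what is proved, stated in full; the proofs are below) =====
def Claim_equal_locate_data_loss : Prop := ∀ (data : List Int) (num_zeros : Int), Dom_locate_data_loss data num_zeros → Pre_locate_data_loss data num_zeros → Spec_locate_data_loss data num_zeros (locate_data_loss data num_zeros)

-- ===== LEMMAS AND PROOFS =====

lemma pvZeroLen_le (l : List Int) : pvZeroLen l ≤ l.length := by
  induction l with
  | nil => simp [pvZeroLen]
  | cons d rest ih =>
    simp only [pvZeroLen]
    split
    · simp; omega
    · simp


-- A's loop-plus-final-block, started on the suffix l at index i from state st.
def pvArest (num_zeros : Int) (l : List Int) (i : Int)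
    (st : List (List Int) × Int × Option Int × Int) : List (List Int) × Int :=
  let r := pvLoopA num_zeros l i st
  if r.2.2.2 ≥ num_zeros then
    (r.1 ++ [[r.2.2.1.getD 0, i + (l.length : Int) - 1]],
     r.2.1 + (i + (l.length : Int) - 1 - r.2.2.1.getD 0))
  else (r.1, r.2.1)

lemma pvRuns_congr : ∀ (f1 f2 : Nat) (l : List Int) (i : Int),
    l.length ≤ f1 → l.length ≤ f2 → pvRuns f1 l i = pvRuns f2 l i := by
  intro f1
  induction f1 with
  | zero =>
    intro f2 l i h1 h2
    have hl : l = [] := by cases l <;> simp_all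
    subst hl; cases f2 <;> simp [pvRuns]
  | succ f ih =>
    intro f2 l i h1 h2
    cases f2 with
    | zero =>
      have hl : l = [] := by cases l <;> simp_all
      subst hl; simp [pvRuns]
    | succ f2' =>
      cases l with
      | nil => simp [pvRuns]
      | cons d rest =>
        simp only [pvRuns]
        split
        · have hz := pvZeroLen_le rest
          rw [ih f2' _ _ (by simp at h1 ⊢; omega) (by simp at h2 ⊢; omega)]
        · exact ih f2' rest _ (by simp at h1 ⊢; omega) (by simp at h2 ⊢; omega)

lemma pvArest_cons (nz d i : Int) (rest : List Int) (st : List (List Int) × Int × Option Int × Int) :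
    pvArest nz (d :: rest) i st = pvArest nz rest (i + 1) (pvStepA nz st i d) := by
  simp only [pvArest, pvLoopA, List.length_cons]
  have h : i + ((rest.length + 1 : Nat) : Int) - 1 = (i + 1) + (rest.length : Int) - 1 := by
    push_cast; ring
  rw [h]

lemma pv_key (nz : Int) (l : List Int) :
    (∀ (i : Int) (sp : List (List Int)) (tt : Int),
      (0 < nz ∨ l.getLast? = some 0) →
      pvArest nz l i (sp, tt, none, 0)
        = (pvRuns l.length l i).foldl (pvSpanStep nz (i + (l.length : Int))) (sp, tt))
    ∧ (∀ (i s : Int) (sp : List (List Int)) (tt : Int),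
      (l = [] ∨ 0 < nz ∨ l.getLast? = some 0) →
      pvArest nz l i (sp, tt, some s, i - s)
        = (pvRuns (l.drop (pvZeroLen l)).length (l.drop (pvZeroLen l)) (i + (pvZeroLen l : Int))).foldl
            (pvSpanStep nz (i + (l.length : Int)))
            (pvSpanStep nz (i + (l.length : Int)) (sp, tt) (s, i + (pvZeroLen l : Int)))) := by
  induction l with
  | nil =>
    constructor
    · intro i sp tt hC
      have hnz : 0 < nz := by
        rcases hC with h | h
        · exact h
        · simp at h
      simp only [pvArest, pvLoopA, pvRuns, List.length_nil, List.foldl_nil]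
      rw [if_neg (by omega)]
    · intro i s sp tt _
      simp only [pvArest, pvLoopA, pvRuns, pvZeroLen, List.drop_nil, List.length_nil,
        List.foldl_nil, pvSpanStep]
      norm_num
  | cons d rest ih =>
    obtain ⟨ihN, ihS⟩ := ih
    by_cases hd : d = 0
    · subst hd
      constructor
      · intro i sp tt hC
        rw [pvArest_cons]
        have hstep : pvStepA nz (sp, tt, none, 0) i 0 = (sp, tt, some i, (i + 1) - i) := by
          simp [pvStepA]
        rw [hstep]
        have hC' : rest = [] ∨ 0 < nz ∨ rest.getLast? = some 0 := by
          rcases hC with h | h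
          · exact Or.inr (Or.inl h)
          · cases rest with
            | nil => exact Or.inl rfl
            | cons r rs => simp only [List.getLast?_cons_cons] at h; exact Or.inr (Or.inr h)
        rw [ihS (i + 1) i sp tt hC']
        simp only [pvRuns, List.length_cons]
        rw [pvRuns_congr rest.length (rest.drop (pvZeroLen rest)).length _ _
          (by simp [List.length_drop]) (le_refl _)]
        have h1 : (i : Int) + 1 + ((pvZeroLen rest : Int)) = i + (((pvZeroLen rest : Nat) + 1 : Nat) : Int) := by
          push_cast; ring
        have h2 : (i : Int) + 1 + ((rest.length : Int)) = i + (((rest.length + 1 : Nat)) : Int) := by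
          push_cast; ring
        rw [h1, h2]
        simp
      · intro i s sp tt hC
        rw [pvArest_cons]
        have hstep : pvStepA nz (sp, tt, some s, i - s) i 0 = (sp, tt, some s, (i + 1) - s) := by
          simp [pvStepA]; ring
        rw [hstep]
        have hC' : rest = [] ∨ 0 < nz ∨ rest.getLast? = some 0 := by
          rcases hC with h | h
          · exact absurd h (by simp)
          · rcases h with h | h
            · exact Or.inr (Or.inl h)
            · cases rest with
              | nil => exact Or.inl rfl
              | cons r rs => simp only [List.getLast?_cons_cons] at h; exact Or.inr (Or.inr h)
        rw [ihS (i + 1) s sp tt hC']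
        have hz : pvZeroLen (0 :: rest) = pvZeroLen rest + 1 := by simp [pvZeroLen]
        simp only [hz, List.drop_succ_cons, List.length_cons]
        have h1 : (i : Int) + 1 + ((pvZeroLen rest : Int)) = i + (((pvZeroLen rest + 1 : Nat)) : Int) := by
          push_cast; ring
        have h2 : (i : Int) + 1 + ((rest.length : Int)) = i + (((rest.length + 1 : Nat)) : Int) := by
          push_cast; ring
        rw [h1, h2]
    · constructor
      · intro i sp tt hC
        rw [pvArest_cons]
        have hstep : pvStepA nz (sp, tt, none, 0) i d = (sp, tt, none, 0) := by
          simp [pvStepA, hd]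
        rw [hstep]
        have hC' : 0 < nz ∨ rest.getLast? = some 0 := by
          rcases hC with h | h
          · exact Or.inl h
          · cases rest with
            | nil => exact absurd (by simpa using h) hd
            | cons r rs => simp only [List.getLast?_cons_cons] at h; exact Or.inr h
        rw [ihN (i + 1) sp tt hC']
        simp only [pvRuns, List.length_cons, if_neg hd]
        have h2 : (i : Int) + 1 + ((rest.length : Int)) = i + (((rest.length + 1 : Nat)) : Int) := by
          push_cast; ring
        rw [h2]
      · intro i s sp tt hC
        have hCr : 0 < nz ∨ (d :: rest).getLast? = some 0 := by
          rcases hC with h | h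
          · exact absurd h (by simp)
          · exact h
        have hC' : 0 < nz ∨ rest.getLast? = some 0 := by
          rcases hCr with h | h
          · exact Or.inl h
          · cases rest with
            | nil => exact absurd (by simpa using h) hd
            | cons r rs => simp only [List.getLast?_cons_cons] at h; exact Or.inr h
        rw [pvArest_cons]
        have hz : pvZeroLen (d :: rest) = 0 := by simp [pvZeroLen, hd]
        simp only [hz, List.drop_zero, Nat.cast_zero, add_zero]
        simp only [pvRuns, List.length_cons, if_neg hd]
        have hstep : pvStepA nz (sp, tt, some s, i - s) i d =
            (if i - s ≥ nz then (sp ++ [[s, i]], tt + (i - s), none, 0) else (sp, tt, none, 0)) := by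
          simp [pvStepA, hd]
        have h2 : (i : Int) + 1 + ((rest.length : Int)) = i + (((rest.length + 1 : Nat)) : Int) := by
          push_cast; ring
        have hlt : i < i + (((rest.length + 1 : Nat)) : Int) := by push_cast; omega
        by_cases hge : nz ≤ i - s
        · rw [hstep, if_pos (by omega : i - s ≥ nz), ihN (i + 1) (sp ++ [[s, i]]) (tt + (i - s)) hC']
          rw [h2]
          simp only [pvSpanStep, ge_iff_le, if_pos hge, if_pos hlt]
        · rw [hstep, if_neg (by omega : ¬ i - s ≥ nz), ihN (i + 1) sp tt hC']
          rw [h2]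
          simp only [pvSpanStep, ge_iff_le, if_neg hge]


-- ===== VERDICT (by name: the statement is the Claim_ definition above) =====
theorem locate_data_loss_spec : Claim_equal_locate_data_loss := by
  intro data nz _ hPre
  unfold Spec_locate_data_loss
  have hA : locate_data_loss data nz = pvArest nz data 0 ([], 0, none, 0) := by
    unfold locate_data_loss pvArest
    rcases hE : pvLoopA nz data 0 ([], 0, none, 0) with ⟨sp, t, ls, dz⟩
    simp
  rw [hA, (pv_key nz data).1 0 [] 0 hPre]
  unfold locate_data_loss_alt
  simp
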